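-- pv_equiv track=rewrite | github.com/emendietat/UCuencaDev | IngTelecomunicaciones/Ciclo_2/PAET/Python/Practicas/SesionPractica7/Ejercicio2.py | get_patron
-- ===== SOURCE A (Python) =====
-- def get_patron(profundidad):
--     patron = ''
--     linea = ''
--     if profundidad % 2 != 0:
--         for i in range(profundidad):
--             if i > profundidad // 2:
--                 linea = linea[:-2]
--             else:
--                 linea += '* '
--             patron += f'\n{linea}'
--     return patron
-- ===== SOURCE B (Python) =====
-- def get_patron(profundidad):
--     if profundidad % 2 == 0:
--         return ''
--     mid = profundidad // 2
--     return ''.join('\n' + '* ' * (mid + 1 - abs(i - mid)) for i in range(profundidad))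
-- ===== Notes on version B (the rewrite author's own statement) =====
-- stated objective: simpler
-- what changed: Replaces A's stateful grow-then-slice accumulator loop with a branchless closed-form star count per line derived from the distance of the line index to the middle line, joined over the range.
import Mathlib
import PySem

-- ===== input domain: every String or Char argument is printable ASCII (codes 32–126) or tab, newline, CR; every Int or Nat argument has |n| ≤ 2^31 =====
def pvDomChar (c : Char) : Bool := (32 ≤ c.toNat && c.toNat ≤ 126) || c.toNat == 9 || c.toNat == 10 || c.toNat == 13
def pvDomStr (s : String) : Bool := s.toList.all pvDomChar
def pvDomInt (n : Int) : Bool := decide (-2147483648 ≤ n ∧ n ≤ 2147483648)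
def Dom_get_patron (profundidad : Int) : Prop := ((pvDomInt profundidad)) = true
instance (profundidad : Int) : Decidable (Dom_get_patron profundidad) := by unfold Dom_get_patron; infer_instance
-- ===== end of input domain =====

-- B replaces A's stateful grow-then-slice accumulator with a branchless closed-form
-- star count per line; objective: simpler. Both programs are total.

-- ===== PORT A =====
-- one loop iteration: state = (patron, linea)
def pvStepA (profundidad : Int) (st : List Char × List Char) (i : Int) : List Char × List Char :=
  let linea :=
    if i > PySem.Int.floordiv profundidad 2 then
      PySem.List.slice st.2 none (some (-2))
    else st.2 ++ ['*', ' ']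
  (st.1 ++ '\n' :: linea, linea)

def get_patron (profundidad : Int) : String :=
  if PySem.Int.mod profundidad 2 ≠ 0 then
    String.ofList
      (((PySem.List.pyRange 0 profundidad 1).foldl (pvStepA profundidad) ([], [])).1)
  else
    String.ofList []

-- ===== PORT B =====
def get_patron_alt (profundidad : Int) : String :=
  if PySem.Int.mod profundidad 2 = 0 then
    String.ofList []
  else
    let mid := PySem.Int.floordiv profundidad 2
    String.ofList
      (PySem.Chars.join []
        ((PySem.List.pyRange 0 profundidad 1).map
          (fun i => '\n' :: PySem.List.pyRepeat ['*', ' '] (mid + 1 - |i - mid|))))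

-- ===== PRECONDITION & SPEC =====
def Spec_get_patron (profundidad : Int) (out : String) : Prop := out = get_patron_alt profundidad
instance (profundidad : Int) (out : String) : Decidable (Spec_get_patron profundidad out) := by unfold Spec_get_patron; infer_instance

-- ===== CLAIM (what is proved, stated in full; the proofs are below) =====
def Claim_equal_get_patron : Prop := ∀ (profundidad : Int), Dom_get_patron profundidad → Spec_get_patron profundidad (get_patron profundidad)

-- ===== LEMMAS AND PROOFS =====

-- '* ' repeated c times, as a list of chars
def pvStars : Nat → List Char
  | 0 => []
  | c + 1 => '*' :: ' ' :: pvStars c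

theorem pvStars_length (c : Nat) : (pvStars c).length = 2 * c := by
  induction c with
  | zero => rfl
  | succ c ih => simp [pvStars, ih]; omega

theorem pvStars_append_one (c : Nat) : pvStars c ++ ['*', ' '] = pvStars (c + 1) := by
  induction c with
  | zero => rfl
  | succ c ih => simp [pvStars] at ih ⊢; exact ih

theorem pvStars_take (c : Nat) : (pvStars (c + 1)).take (2 * c) = pvStars c := by
  induction c with
  | zero => rfl
  | succ c ih =>
    have h : 2 * (c + 1) = (2 * c) + 1 + 1 := by omega
    rw [h]
    show List.take (2 * c + 1 + 1) ('*' :: ' ' :: pvStars (c + 1)) = '*' :: ' ' :: pvStars c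
    rw [List.take_succ_cons, List.take_succ_cons, ih]

theorem pvStars_slice (c : Nat) :
    PySem.List.slice (pvStars (c + 1)) none (some (-2)) = pvStars c := by
  rw [PySem.List.slice_to_neg_ofNat _ 2 (by omega), pvStars_length]
  have h : 2 * (c + 1) - 2 = 2 * c := by omega
  rw [h, pvStars_take]

theorem pvRepeat_stars (n : Int) : PySem.List.pyRepeat ['*', ' '] n = pvStars n.toNat := by
  unfold PySem.List.pyRepeat
  induction n.toNat with
  | zero => rfl
  | succ c ih => simp [List.replicate_succ, pvStars, ih]

theorem pv_floordiv_odd (m : Nat) : PySem.Int.floordiv (2 * (m : Int) + 1) 2 = (m : Int) := by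
  rw [PySem.Int.floordiv_eq_iff_of_pos (by omega)]; omega

-- the loop invariant: after k iterations, patron is B's join of the first k lines
-- and linea holds min k (2m+2-k) stars
theorem pvLoopA (m : Nat) (k : Nat) (hk : k ≤ 2 * m + 1) :
    (PySem.List.pyRange 0 (k : Int) 1).foldl (pvStepA (2 * (m : Int) + 1)) ([], []) =
      (((PySem.List.pyRange 0 (k : Int) 1).map
          (fun i => '\n' :: pvStars ((m : Int) + 1 - |i - (m : Int)|).toNat)).flatten,
        pvStars (min k (2 * m + 2 - k))) := by
  induction k with
  | zero =>
    rw [show ((0 : Nat) : Int) = 0 from rfl, PySem.List.pyRange_one_eq_nil (le_refl 0)]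
    simp [pvStars]
  | succ k ih =>
    have hk' : k ≤ 2 * m + 1 := by omega
    have hrange : PySem.List.pyRange 0 ((k : Int) + 1) 1 =
        PySem.List.pyRange 0 (k : Int) 1 ++ [(k : Int)] := by
      exact PySem.List.pyRange_one_succ_right (by omega)
    push_cast
    rw [hrange, List.foldl_append, ih hk', List.map_append, List.flatten_append]
    simp only [List.foldl_cons, List.foldl_nil, List.map_cons, List.map_nil]
    unfold pvStepA
    rw [pv_floordiv_odd]
    by_cases hc : (k : Int) > (m : Int)
    · -- shrinking phase: k > m, current count is 2m+2-k ≥ 2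
      have hkm : m < k := by exact_mod_cast hc
      have h1 : min k (2 * m + 2 - k) = (2 * m + 2 - k - 1) + 1 := by omega
      have h3 : ((m : Int) + 1 - |(k : Int) - (m : Int)|).toNat = 2 * m + 2 - k - 1 := by
        have : |(k : Int) - (m : Int)| = (k : Int) - (m : Int) := abs_of_nonneg (by omega)
        omega
      simp only [if_pos hc, h1, h3, pvStars_slice]
      refine Prod.ext (by simp) ?_
      dsimp only
      congr 1
      omega
    · -- growing phase: k ≤ m
      have hkm : k ≤ m := by omega
      have h1 : min k (2 * m + 2 - k) = k := by omega
      have h3 : ((m : Int) + 1 - |(k : Int) - (m : Int)|).toNat = k + 1 := by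
        have : |(k : Int) - (m : Int)| = -((k : Int) - (m : Int)) := by
          rw [abs_of_nonpos (by omega)]
        omega
      simp only [if_neg hc, h1, h3, pvStars_append_one]
      refine Prod.ext (by simp) ?_
      dsimp only
      congr 1
      omega

theorem pv_join_flatten (ps : List (List Char)) : PySem.Chars.join [] ps = ps.flatten := by
  unfold PySem.Chars.join
  induction ps with
  | nil => rfl
  | cons p ps ih => cases ps <;> simp_all [List.intercalate, List.intersperse]

-- ===== VERDICT (by name: the statement is the Claim_ definition above) =====
theorem get_patron_spec : Claim_equal_get_patron := by
  intro p _
  unfold Spec_get_patron get_patron get_patron_alt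
  by_cases hm : PySem.Int.mod p 2 = 0
  · rw [if_neg (not_not_intro hm), if_pos hm]
  · rw [if_pos hm, if_neg hm]
    by_cases hp : p ≤ 0
    · rw [PySem.List.pyRange_one_eq_nil hp]; rfl
    · -- p positive and odd: p = 2m+1
      have hodd : ¬ (2 ∣ p) := by
        rw [← PySem.Int.mod_eq_zero_iff_dvd]; exact hm
      obtain ⟨m, hmval⟩ : ∃ m : Nat, p = 2 * (m : Int) + 1 := by
        refine ⟨(p / 2).toNat, ?_⟩; omega
      subst hmval
      have hloop := pvLoopA m (2 * m + 1) (le_refl _)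
      push_cast at hloop
      rw [hloop]
      simp only [pv_floordiv_odd, pv_join_flatten, pvRepeat_stars]
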